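-- pv_equiv track=rewrite | github.com/mahmoud-amiri/systemverilog_dpi_python | api_example/client.py | unescape_json_characters
-- ===== SOURCE A (Python) =====
-- def unescape_json_characters(escaped_string):
--     # Define the mapping of custom strings back to JSON characters
--     replacements = {
--         '#1*': '{',
--         '#2*': '}',
--         '#3*': '[',
--         '#4*': ']',
--         '#5*': ':',
--         '#6*': ',',
--         '#7*': '"',
--         '#8*': 'true',
--         '#9*': 'false',
--         '#0*': 'null',
--         '#A*': ' ',
--         '#B*': '\n',
--         '#C*': '\t'
--     }
--
--     # Replace each custom string in the input with the corresponding JSON character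
--     for custom_str, json_char in replacements.items():
--         escaped_string = escaped_string.replace(custom_str, json_char)
--
--     return escaped_string
-- ===== SOURCE B (Python) =====
-- def unescape_json_characters(escaped_string):
--     # Single left-to-right scan: the 13 tokens all have the form '#X*', so map the
--     # middle character and emit replacements in one pass over the input.
--     middles = '1234567890ABC'
--     outs = ['{', '}', '[', ']', ':', ',', '"', 'true', 'false', 'null', ' ', '\n', '\t']
--     replacements = {'#%s*' % m: out for m, out in zip(middles, outs)}
--     parts = []
--     i = 0
--     n = len(escaped_string)
--     while i < n:
--         token = escaped_string[i:i + 3]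
--         if token in replacements:
--             parts.append(replacements[token])
--             i += 3
--         else:
--             parts.append(escaped_string[i])
--             i += 1
--     return ''.join(parts)
-- ===== Notes on version B (the rewrite author's own statement) =====
-- stated objective: alternative
-- what changed: Replaces the 13 sequential str.replace passes by one left-to-right scan that recognises the 3-char '#X*' tokens and emits the mapped text in a single pass over the input.
import Mathlib
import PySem

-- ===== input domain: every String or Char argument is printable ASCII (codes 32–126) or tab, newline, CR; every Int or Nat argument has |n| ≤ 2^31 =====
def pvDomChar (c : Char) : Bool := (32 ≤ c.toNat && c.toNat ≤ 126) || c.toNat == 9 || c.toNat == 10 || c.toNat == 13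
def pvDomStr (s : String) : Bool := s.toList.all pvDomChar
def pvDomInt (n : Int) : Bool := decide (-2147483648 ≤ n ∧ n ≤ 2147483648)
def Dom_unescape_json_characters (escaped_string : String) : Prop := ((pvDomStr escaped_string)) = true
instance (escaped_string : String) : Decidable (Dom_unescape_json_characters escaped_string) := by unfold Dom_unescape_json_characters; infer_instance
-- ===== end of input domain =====

-- B replaces A's 13 sequential str.replace passes by one left-to-right scan recognising the
-- 3-char '#X*' tokens (alternative single-pass decomposition; return value proved identical).

-- ===== PORT A =====
def unescape_json_characters (escaped_string : String) : String :=
  -- dict[str, str] ported as an association list in insertion order (type convention);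
  -- the dict is only iterated via .items(), which is this list
  let replacements : List (String × String) :=
    [("#1*", "{"), ("#2*", "}"), ("#3*", "["), ("#4*", "]"), ("#5*", ":"),
     ("#6*", ","), ("#7*", "\""), ("#8*", "true"), ("#9*", "false"),
     ("#0*", "null"), ("#A*", " "), ("#B*", "\n"), ("#C*", "\t")]
  replacements.foldl (fun s p => PySem.Str.replace s p.1 p.2) escaped_string

-- ===== PORT B =====
-- the same 13 mappings, middle char ↦ replacement text (Source B's dict keyed by the 3-char token)
def pvTable : List (Char × List Char) :=
  [('1', ['{']), ('2', ['}']), ('3', ['[']), ('4', [']']), ('5', [':']),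
   ('6', [',']), ('7', ['"']), ('8', ['t','r','u','e']), ('9', ['f','a','l','s','e']),
   ('0', ['n','u','l','l']), ('A', [' ']), ('B', ['\n']), ('C', ['\t'])]

def pvMidOut? (c : Char) : Option (List Char) :=
  (pvTable.find? (fun e => e.1 == c)).map (·.2)

def pvScan : List Char → List Char
  | [] => []
  | '#' :: m :: '*' :: t =>
    match pvMidOut? m with
    | some out => out ++ pvScan t
    | none => '#' :: pvScan (m :: '*' :: t)
  | c :: t => c :: pvScan t

def unescape_json_characters_alt (escaped_string : String) : String :=
  String.ofList (pvScan escaped_string.toList)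

-- ===== PRECONDITION & SPEC =====
def Spec_unescape_json_characters (escaped_string : String) (out : String) : Prop := out = unescape_json_characters_alt escaped_string
instance (escaped_string : String) (out : String) : Decidable (Spec_unescape_json_characters escaped_string out) := by unfold Spec_unescape_json_characters; infer_instance

-- ===== CLAIM (what is proved, stated in full; the proofs are below) =====
def Claim_equal_unescape_json_characters : Prop := ∀ (escaped_string : String), Dom_unescape_json_characters escaped_string → Spec_unescape_json_characters escaped_string (unescape_json_characters escaped_string)

-- ===== LEMMAS AND PROOFS =====

-- clean recursive characterisation of one Chars.replace pass with a length-3 pattern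
def pvRep (old new : List Char) : List Char → List Char
  | [] => []
  | c :: t => if old.isPrefixOf (c :: t) then new ++ pvRep old new (t.drop 2) else c :: pvRep old new t
termination_by l => l.length
decreasing_by
  · simp
  · simp

theorem pvRep_go (old new : List Char) (h3 : old.length = 3) :
    ∀ (fuel : Nat) (l acc : List Char), l.length ≤ fuel →
      PySem.Chars.replace.go old new fuel l acc = acc.reverse ++ pvRep old new l := by
  intro fuel
  induction fuel with
  | zero => intro l acc hl
            have : l = [] := by cases l <;> simp_all
            subst this; simp [PySem.Chars.replace.go, pvRep]
  | succ n ih =>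
    intro l acc hl
    cases l with
    | nil => simp [PySem.Chars.replace.go, pvRep]
    | cons c t =>
      have ht : t.length ≤ n := by simpa using hl
      rw [PySem.Chars.replace.go]
      by_cases hpre : old.isPrefixOf (c :: t)
      · simp only [hpre, if_pos]
        rw [ih (List.drop old.length (c :: t)) (new.reverse ++ acc)
              (by simp [h3]; omega)]
        rw [pvRep]
        simp [hpre, h3]
      · simp only [hpre]
        rw [ih t (c :: acc) ht, pvRep]
        simp [hpre]

theorem pvReplace_eq (old new : List Char) (h3 : old.length = 3) (s : List Char) :
    PySem.Chars.replace s old new = pvRep old new s := by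
  have hne : old.isEmpty = false := by cases old <;> simp_all
  rw [PySem.Chars.replace, hne]
  simpa using pvRep_go old new h3 s.length s [] le_rfl




-- fold of all 13 single-pattern passes, in A's dict order, over a table suffix
def pvF (ts : List (Char × List Char)) (u : List Char) : List Char :=
  ts.foldl (fun u e => pvRep ['#', e.1, '*'] e.2 u) u

-- does u start with <middle char>, '*' (i.e. would '#'::u start with a token)?
def pvMidStar (u : List Char) : Bool :=
  match u with
  | a :: b :: _ => (pvMidOut? a).isSome && (b == '*')
  | _ => false

-- the per-entry facts the equivalence needs about every table entry
def pvGood (e : Char × List Char) : Prop :=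
  (pvMidOut? e.1).isSome = true ∧ e.1 ≠ '#' ∧
  pvMidOut? (e.2.headD ' ') = none ∧ e.2.headD ' ' ≠ '*' ∧ e.2 ≠ [] ∧ '#' ∉ e.2

theorem pvTable_good : ∀ e ∈ pvTable, pvGood e := by
  intro e he
  fin_cases he <;>
    exact ⟨by decide, by decide, by decide, by decide, by decide, by decide⟩

theorem pvRep_nil (old new : List Char) : pvRep old new [] = [] := by rw [pvRep]

theorem pvMidStar_cons_notMid (a : Char) (rest : List Char) (h : pvMidOut? a = none) :
    pvMidStar (a :: rest) = false := by
  cases rest <;> simp [pvMidStar, h]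

theorem pvMid_hash : pvMidOut? '#' = none := by decide

theorem pvMid_ne_hash (m : Char) (h : (pvMidOut? m).isSome = true) : m ≠ '#' := by
  intro he; subst he; rw [pvMid_hash] at h; simp at h

theorem pvPrefix_iff (m c : Char) (u : List Char) :
    (['#', m, '*'] : List Char).isPrefixOf (c :: u) = true ↔
      c = '#' ∧ ∃ w, u = m :: '*' :: w := by
  cases u with
  | nil => simp [List.isPrefixOf]
  | cons b v =>
    cases v with
    | nil => simp [List.isPrefixOf]
    | cons d w =>
      simp [List.isPrefixOf]
      constructor
      · rintro ⟨h1, h2, h3⟩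
        exact ⟨h1.symm, by simp [← h2, ← h3]⟩
      · rintro ⟨h1, w', h2, h3⟩
        simp_all

theorem pvRep_cons (e : Char × List Char) (he : pvGood e) (c : Char) (u : List Char)
    (h : ¬(c = '#' ∧ pvMidStar u = true)) :
    pvRep ['#', e.1, '*'] e.2 (c :: u) = c :: pvRep ['#', e.1, '*'] e.2 u := by
  rw [pvRep]
  rw [if_neg]
  intro hp
  rcases (pvPrefix_iff e.1 c u).mp hp with ⟨hc, w, hw⟩
  exact h ⟨hc, by simp [hw, pvMidStar, he.1]⟩

theorem pvRep_match (e : Char × List Char) (u : List Char) :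
    pvRep ['#', e.1, '*'] e.2 ('#' :: e.1 :: '*' :: u) = e.2 ++ pvRep ['#', e.1, '*'] e.2 u := by
  rw [pvRep]
  rw [if_pos (by exact (pvPrefix_iff e.1 '#' (e.1 :: '*' :: u)).mpr ⟨rfl, u, rfl⟩)]
  simp

theorem pvRep_pass (e : Char × List Char) (m : Char)
    (hm : (pvMidOut? m).isSome = true) (hne : e.1 ≠ m) (u : List Char) :
    pvRep ['#', e.1, '*'] e.2 ('#' :: m :: '*' :: u) = '#' :: m :: '*' :: pvRep ['#', e.1, '*'] e.2 u := by
  have hmh : m ≠ '#' := pvMid_ne_hash m hm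
  rw [pvRep, if_neg (by intro hp
                        rcases (pvPrefix_iff e.1 '#' (m :: '*' :: u)).mp hp with ⟨-, w, hw⟩
                        exact hne (by injection hw with h1 _; exact h1.symm))]
  rw [pvRep, if_neg (by intro hp
                        exact hmh ((pvPrefix_iff e.1 m ('*' :: u)).mp hp).1)]
  rw [pvRep, if_neg (by intro hp
                        exact absurd ((pvPrefix_iff e.1 '*' u).mp hp).1 (by decide))]

theorem pvRep_append_inert (e : Char × List Char) (pre : List Char) (hpre : '#' ∉ pre)
    (u : List Char) :
    pvRep ['#', e.1, '*'] e.2 (pre ++ u) = pre ++ pvRep ['#', e.1, '*'] e.2 u := by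
  induction pre with
  | nil => simp
  | cons a pre' ih =>
    have ha : a ≠ '#' := by intro h; exact hpre (by simp [h])
    rw [List.cons_append, pvRep,
        if_neg (by intro hp; exact ha ((pvPrefix_iff e.1 a (pre' ++ u)).mp hp).1),
        ih (by intro h; exact hpre (by simp [h]))]
    simp

theorem pvMidStar_rep (e : Char × List Char) (he : pvGood e) (u : List Char) :
    pvMidStar (pvRep ['#', e.1, '*'] e.2 u) = pvMidStar u := by
  obtain ⟨h1, h2, h3, h4, h5, h6⟩ := he
  obtain ⟨c0, cs, hout⟩ : ∃ c0 cs, e.2 = c0 :: cs := by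
    cases hh : e.2 with
    | nil => exact absurd hh h5
    | cons a b => exact ⟨a, b, rfl⟩
  have hc0mid : pvMidOut? c0 = none := by rw [hout] at h3; simpa using h3
  have hc0star : c0 ≠ '*' := by rw [hout] at h4; simpa using h4
  cases u with
  | nil => rw [pvRep_nil]
  | cons c t =>
    by_cases hp : (['#', e.1, '*'] : List Char).isPrefixOf (c :: t) = true
    · rcases (pvPrefix_iff e.1 c t).mp hp with ⟨hc, w, hw⟩
      rw [pvRep, if_pos hp]
      subst hc
      rw [hout, List.cons_append]
      rw [pvMidStar_cons_notMid c0 _ hc0mid, pvMidStar_cons_notMid '#' _ pvMid_hash]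
    · rw [pvRep, if_neg (by simp [hp])]
      cases t with
      | nil => rw [pvRep_nil]
      | cons b t' =>
        by_cases hp2 : (['#', e.1, '*'] : List Char).isPrefixOf (b :: t') = true
        · rcases (pvPrefix_iff e.1 b t').mp hp2 with ⟨hb, w, hw⟩
          rw [pvRep, if_pos hp2, hout]
          subst hb
          simp [pvMidStar, hc0star]
        · rw [pvRep, if_neg (by simp [hp2])]
          simp [pvMidStar]

theorem pvF_nil (ts : List (Char × List Char)) : pvF ts [] = [] := by
  induction ts with
  | nil => rfl
  | cons e ts' ih => rw [pvF, List.foldl_cons, pvRep_nil]; exact ih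

theorem pvF_cons (ts : List (Char × List Char)) (hts : ∀ e ∈ ts, pvGood e)
    (c : Char) (u : List Char) (h : ¬(c = '#' ∧ pvMidStar u = true)) :
    pvF ts (c :: u) = c :: pvF ts u := by
  induction ts generalizing u with
  | nil => rfl
  | cons e ts' ih =>
    have he := hts e (by simp)
    rw [pvF, List.foldl_cons, pvRep_cons e he c u h]
    exact ih (fun e' he' => hts e' (by simp [he'])) (pvRep ['#', e.1, '*'] e.2 u)
      (by rw [pvMidStar_rep e he u]; exact h)

theorem pvF_inert (ts : List (Char × List Char)) (pre : List Char) (hpre : '#' ∉ pre)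
    (u : List Char) : pvF ts (pre ++ u) = pre ++ pvF ts u := by
  induction ts generalizing u with
  | nil => rfl
  | cons e ts' ih =>
    rw [pvF, List.foldl_cons, pvRep_append_inert e pre hpre]
    exact ih (pvRep ['#', e.1, '*'] e.2 u)

theorem pvF_token (ts : List (Char × List Char)) (hts : ∀ e ∈ ts, pvGood e)
    (hmid : ∀ e ∈ ts, (pvMidOut? e.1).isSome = true) :
    ∀ (m : Char) (out u : List Char),
      (ts.find? (fun e => e.1 == m)).map (·.2) = some out →
      pvF ts ('#' :: m :: '*' :: u) = out ++ pvF ts u := by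
  induction ts with
  | nil => intro m out u h; simp at h
  | cons e ts' ih =>
    intro m out u h
    by_cases heq : e.1 = m
    · subst heq
      rw [List.find?_cons_of_pos (by simp)] at h
      have hout : out = e.2 := by simpa using h.symm
      subst hout
      have h6 : '#' ∉ e.2 := (hts e (by simp)).2.2.2.2.2
      simp only [pvF, List.foldl_cons]
      rw [pvRep_match e u]
      have hstep : List.foldl (fun u e => pvRep ['#', e.1, '*'] e.2 u)
          (e.2 ++ pvRep ['#', e.1, '*'] e.2 u) ts' = pvF ts' (e.2 ++ pvRep ['#', e.1, '*'] e.2 u) := rfl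
      rw [hstep, pvF_inert ts' e.2 h6]
      rfl
    · rw [List.find?_cons_of_neg (by simp [heq])] at h
      have hm : (pvMidOut? m).isSome = true := by
        rcases Option.map_eq_some_iff.mp h with ⟨e', he', -⟩
        have h1 : e'.1 = m := by simpa using List.find?_some he'
        have h2 : e' ∈ ts' := List.mem_of_find?_eq_some he'
        exact h1 ▸ hmid e' (by simp [h2])
      simp only [pvF, List.foldl_cons]
      rw [pvRep_pass e m hm heq u]
      exact ih (fun e' he' => hts e' (by simp [he'])) (fun e' he' => hmid e' (by simp [he'])) m out
        (pvRep ['#', e.1, '*'] e.2 u) h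

theorem pvF_scan (u : List Char) : pvF pvTable u = pvScan u := by
  induction u using pvScan.induct with
  | case1 => rw [pvF_nil, pvScan]
  | case2 m t out hmid ih =>
    have hfind : (pvTable.find? (fun e => e.1 == m)).map (·.2) = some out := hmid
    rw [pvF_token pvTable pvTable_good (fun e he => (pvTable_good e he).1) m out t hfind, ih]
    simp only [pvScan, hmid]
  | case3 m t hmid ih =>
    rw [pvF_cons pvTable pvTable_good '#' (m :: '*' :: t)
          (by rintro ⟨-, h2⟩; simp [pvMidStar, hmid] at h2), ih]
    simp only [pvScan, hmid]
  | case4 c t hne ih =>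
    have hcond : ¬(c = '#' ∧ pvMidStar t = true) := by
      rintro ⟨h1, h2⟩
      cases t with
      | nil => simp [pvMidStar] at h2
      | cons a t1 =>
        cases t1 with
        | nil => simp [pvMidStar] at h2
        | cons b rest =>
          simp only [pvMidStar, Bool.and_eq_true, beq_iff_eq] at h2
          have : (pvMidOut? a).isSome = true ∧ b = '*' := h2
          exact hne a rest h1 (by rw [this.2])
    rw [pvF_cons pvTable pvTable_good c t hcond, ih, pvScan.eq_3 c t hne]

theorem pvA_unfold (s : String) : unescape_json_characters s = PySem.Str.replace (PySem.Str.replace (PySem.Str.replace (PySem.Str.replace (PySem.Str.replace (PySem.Str.replace (PySem.Str.replace (PySem.Str.replace (PySem.Str.replace (PySem.Str.replace (PySem.Str.replace (PySem.Str.replace (PySem.Str.replace (s) "#1*" "{") "#2*" "}") "#3*" "[") "#4*" "]") "#5*" ":") "#6*" ",") "#7*" "\"") "#8*" "true") "#9*" "false") "#0*" "null") "#A*" " ") "#B*" "\n") "#C*" "\t" := rfl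

theorem pvF_unfold (u : List Char) : pvF pvTable u = pvRep ['#', 'C', '*'] ['\t'] (pvRep ['#', 'B', '*'] ['\n'] (pvRep ['#', 'A', '*'] [' '] (pvRep ['#', '0', '*'] ['n','u','l','l'] (pvRep ['#', '9', '*'] ['f','a','l','s','e'] (pvRep ['#', '8', '*'] ['t','r','u','e'] (pvRep ['#', '7', '*'] ['\"'] (pvRep ['#', '6', '*'] [','] (pvRep ['#', '5', '*'] [':'] (pvRep ['#', '4', '*'] [']'] (pvRep ['#', '3', '*'] ['['] (pvRep ['#', '2', '*'] ['}'] (pvRep ['#', '1', '*'] ['{'] (u))))))))))))) := rfl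

theorem pvA_toList (s : String) :
    (unescape_json_characters s).toList = pvF pvTable s.toList := by
  rw [pvA_unfold]
  simp only [PySem.Str.toList_replace]
  have ht0 : ("#1*" : String).toList = ['#', '1', '*'] := by decide
  have ht1 : ("#2*" : String).toList = ['#', '2', '*'] := by decide
  have ht2 : ("#3*" : String).toList = ['#', '3', '*'] := by decide
  have ht3 : ("#4*" : String).toList = ['#', '4', '*'] := by decide
  have ht4 : ("#5*" : String).toList = ['#', '5', '*'] := by decide
  have ht5 : ("#6*" : String).toList = ['#', '6', '*'] := by decide
  have ht6 : ("#7*" : String).toList = ['#', '7', '*'] := by decide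
  have ht7 : ("#8*" : String).toList = ['#', '8', '*'] := by decide
  have ht8 : ("#9*" : String).toList = ['#', '9', '*'] := by decide
  have ht9 : ("#0*" : String).toList = ['#', '0', '*'] := by decide
  have ht10 : ("#A*" : String).toList = ['#', 'A', '*'] := by decide
  have ht11 : ("#B*" : String).toList = ['#', 'B', '*'] := by decide
  have ht12 : ("#C*" : String).toList = ['#', 'C', '*'] := by decide
  have hn0 : ("{" : String).toList = ['{'] := by decide
  have hn1 : ("}" : String).toList = ['}'] := by decide
  have hn2 : ("[" : String).toList = ['['] := by decide
  have hn3 : ("]" : String).toList = [']'] := by decide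
  have hn4 : (":" : String).toList = [':'] := by decide
  have hn5 : ("," : String).toList = [','] := by decide
  have hn6 : ("\"" : String).toList = ['\"'] := by decide
  have hn7 : ("true" : String).toList = ['t','r','u','e'] := by decide
  have hn8 : ("false" : String).toList = ['f','a','l','s','e'] := by decide
  have hn9 : ("null" : String).toList = ['n','u','l','l'] := by decide
  have hn10 : (" " : String).toList = [' '] := by decide
  have hn11 : ("\n" : String).toList = ['\n'] := by decide
  have hn12 : ("\t" : String).toList = ['\t'] := by decide
  rw [ht0, ht1, ht2, ht3, ht4, ht5, ht6, ht7, ht8, ht9, ht10, ht11, ht12,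
      hn0, hn1, hn2, hn3, hn4, hn5, hn6, hn7, hn8, hn9, hn10, hn11, hn12]
  rw [pvReplace_eq ['#', '1', '*'] ['{'] (by decide)]
  rw [pvReplace_eq ['#', '2', '*'] ['}'] (by decide)]
  rw [pvReplace_eq ['#', '3', '*'] ['['] (by decide)]
  rw [pvReplace_eq ['#', '4', '*'] [']'] (by decide)]
  rw [pvReplace_eq ['#', '5', '*'] [':'] (by decide)]
  rw [pvReplace_eq ['#', '6', '*'] [','] (by decide)]
  rw [pvReplace_eq ['#', '7', '*'] ['\"'] (by decide)]
  rw [pvReplace_eq ['#', '8', '*'] ['t','r','u','e'] (by decide)]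
  rw [pvReplace_eq ['#', '9', '*'] ['f','a','l','s','e'] (by decide)]
  rw [pvReplace_eq ['#', '0', '*'] ['n','u','l','l'] (by decide)]
  rw [pvReplace_eq ['#', 'A', '*'] [' '] (by decide)]
  rw [pvReplace_eq ['#', 'B', '*'] ['\n'] (by decide)]
  rw [pvReplace_eq ['#', 'C', '*'] ['\t'] (by decide)]
  rw [pvF_unfold]

-- ===== VERDICT (by name: the statement is the Claim_ definition above) =====
theorem unescape_json_characters_spec : Claim_equal_unescape_json_characters := by
  intro s _
  unfold Spec_unescape_json_characters unescape_json_characters_alt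
  apply String.toList_inj.mp
  rw [String.toList_ofList, pvA_toList, pvF_scan]
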